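-- pv_equiv track=rewrite | github.com/SamuelMaltais/CompetitiveProg | Kattis/11 mars/C.py | reduce_arr
-- ===== SOURCE A (Python) =====
-- def reduce_arr(arr, depth, arrs):
--     if len(arr) <= 1:
--         return depth
--     newarr = []
--     for i in range(len(arr) - 1):
--         newarr.append(arr[i + 1] - arr[i])
--     arrs.append(newarr)
--     depth += 1
--
--     if len(newarr) <= 1:
--         return depth
--
--     if newarr[0] == newarr[1]:
--         return depth
--
--     else:
--         return reduce_arr(newarr, depth, arrs)
-- ===== SOURCE B (Python) =====
-- def reduce_arr(arr, depth, arrs):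
--     # Iterative version: explicit while loop over consecutive differences
--     # (same side effect as A: appends each difference array to arrs).
--     while len(arr) > 1:
--         newarr = [b - a for a, b in zip(arr, arr[1:])]
--         arrs.append(newarr)
--         depth += 1
--         if len(newarr) <= 1 or newarr[0] == newarr[1]:
--             break
--         arr = newarr
--     return depth
-- ===== Notes on version B (the rewrite author's own statement) =====
-- stated objective: idiomatic
-- what changed: Replaced the tail recursion with an explicit while loop and the index-based append loop with a zip comprehension building the difference array, combining the two stop conditions into one test.
import Mathlib
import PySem

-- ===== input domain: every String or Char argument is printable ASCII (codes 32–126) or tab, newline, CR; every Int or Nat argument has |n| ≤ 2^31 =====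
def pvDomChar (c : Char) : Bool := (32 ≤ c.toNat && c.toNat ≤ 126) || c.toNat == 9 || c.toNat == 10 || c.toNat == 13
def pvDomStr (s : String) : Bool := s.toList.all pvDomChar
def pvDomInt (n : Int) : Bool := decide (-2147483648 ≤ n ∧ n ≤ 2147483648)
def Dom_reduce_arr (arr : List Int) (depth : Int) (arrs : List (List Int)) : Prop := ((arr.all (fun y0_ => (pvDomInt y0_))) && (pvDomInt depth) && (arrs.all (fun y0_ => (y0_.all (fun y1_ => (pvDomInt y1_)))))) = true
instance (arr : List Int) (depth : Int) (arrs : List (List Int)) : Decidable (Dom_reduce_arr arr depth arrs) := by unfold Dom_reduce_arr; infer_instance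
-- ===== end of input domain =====

-- B rewrites A's tail recursion as a while loop with a zip-built difference list (equivalence is about the
-- RETURN value; both Pythons also append the same difference arrays to arrs in place).

-- ===== PORT A =====
-- A's local 'newarr', built by the index loop 'for i in range(len(arr) - 1): newarr.append(arr[i+1] - arr[i])'
def pvDiffLoopA (arr : List Int) : List Int :=
  (PySem.List.pyRange 0 ((arr.length : Int) - 1) 1).foldl
    (fun acc i => acc ++ [PySem.List.pyGetD arr (i + 1) 0 - PySem.List.pyGetD arr i 0]) []

-- needed by the port's termination proof, so it stays above the port
theorem pvDiffLoopA_length (arr : List Int) : (pvDiffLoopA arr).length = arr.length - 1 := by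
  rw [pvDiffLoopA, PySem.List.foldl_append_singleton_eq_map, List.nil_append,
      List.length_map, PySem.List.length_pyRange_one]
  omega

def reduce_arr (arr : List Int) (depth : Int) (arrs : List (List Int)) : Int :=
  if arr.length ≤ 1 then depth
  else
    if (pvDiffLoopA arr).length ≤ 1 then depth + 1
    else if PySem.List.pyGetD (pvDiffLoopA arr) 0 0 = PySem.List.pyGetD (pvDiffLoopA arr) 1 0 then depth + 1
    else reduce_arr (pvDiffLoopA arr) (depth + 1) (arrs ++ [pvDiffLoopA arr])
termination_by arr.length
decreasing_by
  have := pvDiffLoopA_length arr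
  omega

-- ===== PORT B =====
-- B's local 'newarr' = [b - a for a, b in zip(arr, arr[1:])]
def pvDiffZipB (arr : List Int) : List Int :=
  List.zipWith (fun a b => b - a) arr (PySem.List.slice arr (some 1) none)

-- B's 'while len(arr) > 1:' loop; one recursive call = one iteration with the updated loop state
def reduce_arr_alt (arr : List Int) (depth : Int) (arrs : List (List Int)) : Int :=
  if arr.length > 1 then
    if (pvDiffZipB arr).length ≤ 1 ∨ PySem.List.pyGetD (pvDiffZipB arr) 0 0 = PySem.List.pyGetD (pvDiffZipB arr) 1 0
    then depth + 1
    else reduce_arr_alt (pvDiffZipB arr) (depth + 1) (arrs ++ [pvDiffZipB arr])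
  else depth
termination_by arr.length
decreasing_by
  simp [pvDiffZipB, PySem.List.slice]
  omega

-- ===== PRECONDITION & SPEC =====
def Spec_reduce_arr (arr : List Int) (depth : Int) (arrs : List (List Int)) (out : Int) : Prop := out = reduce_arr_alt arr depth arrs
instance (arr : List Int) (depth : Int) (arrs : List (List Int)) (out : Int) : Decidable (Spec_reduce_arr arr depth arrs out) := by unfold Spec_reduce_arr; infer_instance

-- ===== CLAIM (what is proved, stated in full; the proofs are below) =====
def Claim_equal_reduce_arr : Prop := ∀ (arr : List Int) (depth : Int) (arrs : List (List Int)), Dom_reduce_arr arr depth arrs → Spec_reduce_arr arr depth arrs (reduce_arr arr depth arrs)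

-- ===== LEMMAS AND PROOFS =====

-- A's index loop and B's zip comprehension build the same difference list.
theorem pvDiff_eq (arr : List Int) : pvDiffLoopA arr = pvDiffZipB arr := by
  rw [pvDiffLoopA, pvDiffZipB, PySem.List.foldl_append_singleton_eq_map, List.nil_append,
      PySem.List.slice_from arr (by norm_num)]
  apply List.ext_getElem
  · simp [PySem.List.length_pyRange_one]
  · intro k h1 h2
    have hk : (k : Int) < (arr.length : Int) - 1 := by
      simp [PySem.List.length_pyRange_one] at h1; omega
    simp only [List.getElem_map, PySem.List.getElem_pyRange_one, List.getElem_zipWith]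
    rw [PySem.List.pyGetD_eq_getElem arr 0 (by omega) (by omega),
        PySem.List.pyGetD_eq_getElem arr 0 (by omega) (by omega)]
    simp

-- A = B, by induction on a bound on the length of arr (each loop step shortens arr by one).
theorem reduce_arr_eq_aux : ∀ (n : Nat) (arr : List Int) (depth : Int) (arrs : List (List Int)),
    arr.length ≤ n → reduce_arr arr depth arrs = reduce_arr_alt arr depth arrs := by
  intro n
  induction n with
  | zero =>
      intro arr depth arrs hn
      rw [reduce_arr, reduce_arr_alt, if_pos (show arr.length ≤ 1 by omega), if_neg (show ¬ arr.length > 1 by omega)]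
  | succ m ih =>
      intro arr depth arrs hn
      have hlen := pvDiffLoopA_length arr
      rw [reduce_arr, reduce_arr_alt, ← pvDiff_eq]
      by_cases h1 : arr.length ≤ 1
      · rw [if_pos h1, if_neg (by omega)]
      · rw [if_neg h1, if_pos (show arr.length > 1 by omega)]
        by_cases h2 : (pvDiffLoopA arr).length ≤ 1
        · rw [if_pos h2, if_pos (Or.inl h2)]
        · by_cases h3 : PySem.List.pyGetD (pvDiffLoopA arr) 0 0 = PySem.List.pyGetD (pvDiffLoopA arr) 1 0
          · rw [if_neg h2, if_pos h3, if_pos (Or.inr h3)]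
          · rw [if_neg h2, if_neg h3, if_neg (by push Not; exact ⟨by omega, h3⟩)]
            exact ih _ _ _ (by omega)

theorem reduce_arr_eq (arr : List Int) (depth : Int) (arrs : List (List Int)) :
    reduce_arr arr depth arrs = reduce_arr_alt arr depth arrs :=
  reduce_arr_eq_aux arr.length arr depth arrs le_rfl

-- ===== VERDICT (by name: the statement is the Claim_ definition above) =====
theorem reduce_arr_spec : Claim_equal_reduce_arr := by
  intro arr depth arrs _
  unfold Spec_reduce_arr
  exact reduce_arr_eq arr depth arrs
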